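-- pv_equiv track=rewrite | github.com/EdrilMatheus/locacao_dom_medical | validacoes.py | conflito_locacao
-- ===== SOURCE A (Python) =====
-- def conflito_locacao(data, periodo, salas_solicitadas, locacoes_existentes):
--     salas_solicitadas = [s.strip() for s in salas_solicitadas.split(',')]
--
--     for loc in locacoes_existentes:
--         data_existente = loc[3]
--         periodo_existente = loc[4]
--         salas_existentes = [s.strip() for s in loc[5].split(',')]
--
--         if data == data_existente and periodo == periodo_existente:
--             for sala in salas_solicitadas:
--                 if sala in salas_existentes:
--                     return True  # Conflito encontrado
--     return False  # Nenhum conflito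
-- ===== SOURCE B (Python) =====
-- def conflito_locacao(data, periodo, salas_solicitadas, locacoes_existentes):
--     ocupadas = set()
--     for loc in locacoes_existentes:
--         if loc[3] == data and loc[4] == periodo:
--             ocupadas.update(s.strip() for s in loc[5].split(','))
--     solicitadas = {s.strip() for s in salas_solicitadas.split(',')}
--     return not solicitadas.isdisjoint(ocupadas)
-- ===== Notes on version B (the rewrite author's own statement) =====
-- stated objective: simpler
-- what changed: Replaces A's interleaved nested loops with early return by one pass that builds the set of occupied rooms over all matching bookings, then a single set-disjointness test against the requested-rooms set.
-- outside the precondition, e.g. on conflito_locacao('d', 'p', 'S1', [('x',)]): A raises IndexError, B raises IndexError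
import Mathlib
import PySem

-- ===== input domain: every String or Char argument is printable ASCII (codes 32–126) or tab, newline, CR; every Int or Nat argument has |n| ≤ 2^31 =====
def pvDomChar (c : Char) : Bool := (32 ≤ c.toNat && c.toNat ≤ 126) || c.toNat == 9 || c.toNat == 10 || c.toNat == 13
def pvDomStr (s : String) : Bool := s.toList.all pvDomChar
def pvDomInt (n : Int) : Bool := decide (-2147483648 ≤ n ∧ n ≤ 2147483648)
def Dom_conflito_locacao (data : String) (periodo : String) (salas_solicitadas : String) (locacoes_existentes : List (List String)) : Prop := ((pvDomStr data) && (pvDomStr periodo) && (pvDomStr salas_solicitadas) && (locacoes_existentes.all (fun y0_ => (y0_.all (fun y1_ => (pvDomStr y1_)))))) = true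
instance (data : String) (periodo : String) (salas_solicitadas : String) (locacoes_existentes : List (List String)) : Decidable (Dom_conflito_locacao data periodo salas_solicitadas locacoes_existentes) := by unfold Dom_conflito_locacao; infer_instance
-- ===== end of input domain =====

-- B builds the occupied-rooms set in one pass and tests set disjointness against the requested rooms, instead of A's interleaved nested loops with early return (objective: simpler).


-- ===== PORT A =====
-- [s.strip() for s in txt.split(',')] — shared literally by both Pythons
def pvRooms (txt : String) : List String := ((PySem.Str.split? txt ",").getD []).map PySem.Str.strip  -- sep "," ≠ "", so split? is some

-- A's outer for-loop with early return; loc[i] = pyGet? (in range under Pre_, '' never reached there)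
def pvLoopA (data : String) (periodo : String) (salas : List String) : List (List String) → Bool
  | [] => false
  | loc :: rest =>
      let data_existente := (PySem.List.pyGet? loc 3).getD ""
      let periodo_existente := (PySem.List.pyGet? loc 4).getD ""
      let salas_existentes := pvRooms ((PySem.List.pyGet? loc 5).getD "")
      if data == data_existente && periodo == periodo_existente then
        -- inner 'for sala in salas: if sala in salas_existentes: return True'
        if salas.any (fun sala => salas_existentes.contains sala) then true
        else pvLoopA data periodo salas rest
      else pvLoopA data periodo salas rest

def conflito_locacao (data : String) (periodo : String) (salas_solicitadas : String) (locacoes_existentes : List (List String)) : Bool :=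
  pvLoopA data periodo (pvRooms salas_solicitadas) locacoes_existentes

-- ===== PORT B =====
def conflito_locacao_alt (data : String) (periodo : String) (salas_solicitadas : String) (locacoes_existentes : List (List String)) : Bool :=
  let ocupadas : PySem.Set String := locacoes_existentes.foldl
    (fun s loc =>
      if ((PySem.List.pyGet? loc 3).getD "" == data) && ((PySem.List.pyGet? loc 4).getD "" == periodo) then
        PySem.Set.update s (pvRooms ((PySem.List.pyGet? loc 5).getD ""))
      else s)
    PySem.Set.empty
  let solicitadas : PySem.Set String := PySem.Set.ofList (pvRooms salas_solicitadas)
  !(PySem.Set.isdisjoint solicitadas ocupadas)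

-- ===== PRECONDITION & SPEC =====
-- Pre_ excludes bookings with fewer than 6 fields, on which A raises IndexError at loc[3]/loc[4]/loc[5].
def Pre_conflito_locacao (data : String) (periodo : String) (salas_solicitadas : String) (locacoes_existentes : List (List String)) : Prop :=
  ∀ loc ∈ locacoes_existentes, 6 ≤ loc.length
instance (data : String) (periodo : String) (salas_solicitadas : String) (locacoes_existentes : List (List String)) : Decidable (Pre_conflito_locacao data periodo salas_solicitadas locacoes_existentes) := by unfold Pre_conflito_locacao; infer_instance

def pvWitness_conflito_locacao : String × String × String × List (List String) :=
  ("d", "p", "S1, S3", [["1", "x", "y", "d", "p", "S1, S2"]])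

def Spec_conflito_locacao (data : String) (periodo : String) (salas_solicitadas : String) (locacoes_existentes : List (List String)) (out : Bool) : Prop := out = conflito_locacao_alt data periodo salas_solicitadas locacoes_existentes
instance (data : String) (periodo : String) (salas_solicitadas : String) (locacoes_existentes : List (List String)) (out : Bool) : Decidable (Spec_conflito_locacao data periodo salas_solicitadas locacoes_existentes out) := by unfold Spec_conflito_locacao; infer_instance

-- ===== CLAIM (what is proved, stated in full; the proofs are below) =====
def Claim_equal_conflito_locacao : Prop := ∀ (data : String) (periodo : String) (salas_solicitadas : String) (locacoes_existentes : List (List String)), Dom_conflito_locacao data periodo salas_solicitadas locacoes_existentes → Pre_conflito_locacao data periodo salas_solicitadas locacoes_existentes → Spec_conflito_locacao data periodo salas_solicitadas locacoes_existentes (conflito_locacao data periodo salas_solicitadas locacoes_existentes)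

-- ===== LEMMAS AND PROOFS =====

-- field accessors / the match condition / the rooms of a booking, used only by the proofs
def pvG (loc : List String) (i : Int) : String := (PySem.List.pyGet? loc i).getD ""

lemma pvLoopA_iff (data periodo : String) (salas : List String) (locs : List (List String)) :
    pvLoopA data periodo salas locs = true ↔
      ∃ loc ∈ locs, (data = pvG loc 3 ∧ periodo = pvG loc 4) ∧
        ∃ sala ∈ salas, sala ∈ pvRooms (pvG loc 5) := by
  induction locs with
  | nil => simp [pvLoopA]
  | cons loc rest ih =>
      simp only [pvLoopA, pvG] at *
      split_ifs with hc hi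
      · simp only [Bool.and_eq_true, beq_iff_eq] at hc
        simp only [List.any_eq_true, List.contains_iff_mem] at hi
        simp only [List.mem_cons, true_iff]
        exact ⟨loc, Or.inl rfl, ⟨hc.1, hc.2⟩, hi⟩
      · simp only [List.any_eq_true, List.contains_iff_mem] at hi
        simp only [Bool.and_eq_true, beq_iff_eq] at hc
        rw [ih]
        constructor
        · rintro ⟨l, hl, h⟩; exact ⟨l, List.mem_cons_of_mem _ hl, h⟩
        · rintro ⟨l, hl, h⟩
          rcases List.mem_cons.mp hl with rfl | hl
          · exact absurd h.2 (by simpa using hi)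
          · exact ⟨l, hl, h⟩
      · simp only [Bool.and_eq_true, beq_iff_eq] at hc
        rw [ih]
        constructor
        · rintro ⟨l, hl, h⟩; exact ⟨l, List.mem_cons_of_mem _ hl, h⟩
        · rintro ⟨l, hl, h⟩
          rcases List.mem_cons.mp hl with rfl | hl
          · exact absurd ⟨h.1.1, h.1.2⟩ hc
          · exact ⟨l, hl, h⟩

lemma pvOcc_mem (data periodo : String) (locs : List (List String)) (init : PySem.Set String) (x : String) :
    x ∈ locs.foldl
      (fun s loc =>
        if ((PySem.List.pyGet? loc 3).getD "" == data) && ((PySem.List.pyGet? loc 4).getD "" == periodo) then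
          PySem.Set.update s (pvRooms ((PySem.List.pyGet? loc 5).getD ""))
        else s) init ↔
    x ∈ init ∨ ∃ loc ∈ locs, (data = pvG loc 3 ∧ periodo = pvG loc 4) ∧ x ∈ pvRooms (pvG loc 5) := by
  induction locs generalizing init with
  | nil => simp
  | cons loc rest ih =>
      simp only [List.foldl_cons]
      split_ifs with hc
      · simp only [Bool.and_eq_true, beq_iff_eq] at hc
        rw [ih, PySem.Set.mem_update]
        constructor
        · rintro (⟨h | h⟩ | ⟨l, hl, h⟩)
          · exact Or.inl h
          · exact Or.inr ⟨loc, List.mem_cons_self, ⟨hc.1.symm, hc.2.symm⟩, h⟩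
          · exact Or.inr ⟨l, List.mem_cons_of_mem _ hl, h⟩
        · rintro (h | ⟨l, hl, h⟩)
          · exact Or.inl (Or.inl h)
          · rcases List.mem_cons.mp hl with rfl | hl
            · exact Or.inl (Or.inr h.2)
            · exact Or.inr ⟨l, hl, h⟩
      · simp only [Bool.and_eq_true, beq_iff_eq] at hc
        rw [ih]
        constructor
        · rintro (h | ⟨l, hl, h⟩)
          · exact Or.inl h
          · exact Or.inr ⟨l, List.mem_cons_of_mem _ hl, h⟩
        · rintro (h | ⟨l, hl, h⟩)
          · exact Or.inl h
          · rcases List.mem_cons.mp hl with rfl | hl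
            · exact absurd ⟨h.1.1.symm, h.1.2.symm⟩ hc
            · exact Or.inr ⟨l, hl, h⟩

lemma conflito_alt_iff (data periodo salas_solicitadas : String) (locs : List (List String)) :
    conflito_locacao_alt data periodo salas_solicitadas locs = true ↔
      ∃ sala ∈ pvRooms salas_solicitadas, ∃ loc ∈ locs,
        (data = pvG loc 3 ∧ periodo = pvG loc 4) ∧ sala ∈ pvRooms (pvG loc 5) := by
  unfold conflito_locacao_alt
  simp only [Bool.not_eq_eq_eq_not, Bool.not_true, ← Bool.not_eq_true,
    PySem.Set.isdisjoint_iff]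
  push Not
  constructor
  · rintro ⟨x, hx, hocc⟩
    rw [pvOcc_mem] at hocc
    rcases hocc with h | h
    · simp [PySem.Set.empty] at h
    · exact ⟨x, (PySem.Set.mem_ofList _ _).mp hx, h⟩
  · rintro ⟨x, hx, h⟩
    exact ⟨x, (PySem.Set.mem_ofList _ _).mpr hx, (pvOcc_mem _ _ _ _ _).mpr (Or.inr h)⟩

-- ===== VERDICT (by name: the statement is the Claim_ definition above) =====
theorem conflito_locacao_spec : Claim_equal_conflito_locacao := by
  intro data periodo salas_solicitadas locs _ _
  unfold Spec_conflito_locacao conflito_locacao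
  rw [Bool.eq_iff_iff, pvLoopA_iff, conflito_alt_iff]
  constructor
  · rintro ⟨loc, hl, hc, sala, hs, hm⟩; exact ⟨sala, hs, loc, hl, hc, hm⟩
  · rintro ⟨sala, hs, loc, hl, hc, hm⟩; exact ⟨loc, hl, hc, sala, hs, hm⟩
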